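-- pv_equiv track=rewrite | github.com/keemgdeok/Algorithm | 프로그래머스/3/12938. 최고의 집합/최고의 집합.py | solution
-- ===== SOURCE A (Python) =====
-- def solution(n, s):
--     if n > s:
--         return [-1]
--
--     base = s//n
--     remainder = s%n
--     ans = [base]*n
--
--     for i in range(remainder):
--         ans[n-i-1]+=1
--
--     return ans
-- ===== SOURCE B (Python) =====
-- def solution(n, s):
--     if n > s:
--         return [-1]
--     ans = []
--     while n > 0:
--         q = -(-s // n)  # ceiling of the remaining average = the largest remaining element
--         ans.append(q)
--         s -= q
--         n -= 1
--     return list(reversed(ans))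
-- ===== Notes on version B (the rewrite author's own statement) =====
-- stated objective: alternative
-- what changed: Replaces A's base/remainder two-phase construction (fill [s//n]*n, then increment the last s%n slots in place) with a greedy loop that repeatedly appends the ceiling of the remaining average, subtracts it from the sum, and finally reverses the accumulated list.
-- outside the precondition, e.g. on solution(0, 5): A raises ZeroDivisionError, B returns []
import Mathlib
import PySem

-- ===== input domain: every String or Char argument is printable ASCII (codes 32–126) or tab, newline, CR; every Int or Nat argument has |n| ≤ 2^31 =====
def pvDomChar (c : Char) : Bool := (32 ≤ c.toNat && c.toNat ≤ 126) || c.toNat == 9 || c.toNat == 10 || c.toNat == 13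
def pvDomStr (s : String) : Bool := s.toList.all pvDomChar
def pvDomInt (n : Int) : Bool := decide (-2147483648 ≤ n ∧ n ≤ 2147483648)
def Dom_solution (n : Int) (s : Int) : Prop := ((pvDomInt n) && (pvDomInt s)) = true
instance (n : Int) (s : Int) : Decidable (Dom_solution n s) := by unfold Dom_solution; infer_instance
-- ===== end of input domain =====

-- B replaces A's base/remainder construction by a greedy loop: it repeatedly takes the
-- ceiling of the remaining average as the largest remaining element (objective: alternative).

-- ===== PORT A =====
def solution (n : Int) (s : Int) : List Int :=
  if n > s then [-1]
  else
    let base := PySem.Int.floordiv s n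
    let remainder := PySem.Int.mod s n
    let ans := List.replicate n.toNat base   -- [base]*n (empty for n ≤ 0, as in Python)
    (PySem.List.pyRange 0 remainder 1).foldl
      (fun a i => PySem.List.pySetD a (n - i - 1) (PySem.List.pyGetD a (n - i - 1) 0 + 1)) ans

-- ===== PORT B =====
-- the 'while n > 0' loop of Source B: append ceil(s/n), subtract it, decrement n
def solutionAltLoop (n : Int) (s : Int) (ans : List Int) : List Int :=
  if h : 0 < n then
    let q := -(PySem.Int.floordiv (-s) n)   -- -(-s // n) = ceiling division
    solutionAltLoop (n - 1) (s - q) (ans ++ [q])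
  else ans
termination_by n.toNat
decreasing_by omega

def solution_alt (n : Int) (s : Int) : List Int :=
  if n > s then [-1]
  else (solutionAltLoop n s []).reverse

-- ===== PRECONDITION & SPEC =====
-- Pre_ excludes exactly the inputs where A raises ZeroDivisionError: n = 0 with n ≤ s.
def Pre_solution (n : Int) (s : Int) : Prop := n > s ∨ n ≠ 0
instance (n : Int) (s : Int) : Decidable (Pre_solution n s) := by unfold Pre_solution; infer_instance
def pvWitness_solution : Int × Int := (2, 9)

def Spec_solution (n : Int) (s : Int) (out : List Int) : Prop := out = solution_alt n s
instance (n : Int) (s : Int) (out : List Int) : Decidable (Spec_solution n s out) := by unfold Spec_solution; infer_instance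

-- ===== CLAIM (what is proved, stated in full; the proofs are below) =====
def Claim_equal_solution : Prop := ∀ (n : Int) (s : Int), Dom_solution n s → Pre_solution n s → Spec_solution n s (solution n s)

-- ===== LEMMAS AND PROOFS =====

-- A's loop on [base]*N incrementing the last R entries yields the two-block list.
lemma loop_blocks (N : Nat) (base : Int) :
    ∀ R : Nat, R ≤ N →
    (PySem.List.pyRange 0 (R : Int) 1).foldl
      (fun a i => PySem.List.pySetD a ((N : Int) - i - 1) (PySem.List.pyGetD a ((N : Int) - i - 1) 0 + 1))
      (List.replicate N base)
    = List.replicate (N - R) base ++ List.replicate R (base + 1) := by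
  intro R
  induction R with
  | zero => intro _; simp [PySem.List.pyRange_one_eq_nil]
  | succ R ih =>
    intro hRN
    have h1 : ((R : Int) + 1) = ((R + 1 : Nat) : Int) := by push_cast; ring
    rw [← h1, PySem.List.pyRange_one_succ_right (by positivity),
        List.foldl_append, ih (by omega)]
    simp only [List.foldl_cons, List.foldl_nil]
    have hidx : (N : Int) - (R : Int) - 1 = ((N - R - 1 : Nat) : Int) := by omega
    rw [hidx, PySem.List.pySetD_natCast, PySem.List.pyGetD_natCast]
    have hlt : N - R - 1 < N - R := by omega
    have hget : (List.replicate (N - R) base ++ List.replicate R (base + 1)).getD (N - R - 1) 0 = base := by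
      rw [List.getD_eq_getElem?_getD, List.getElem?_append_left (by simpa using hlt)]
      simp [hlt]
    rw [hget]
    apply List.ext_getElem
    · simp; omega
    · intro k hk hk'
      simp only [List.length_set, List.length_append, List.length_replicate] at hk
      by_cases hke : k = N - R - 1
      · subst hke
        rw [List.getElem_set_self (by simp; omega)]
        rw [List.getElem_append_right (by simp; omega)]
        simp
      · rw [List.getElem_set_ne (by omega)]
        by_cases hkl : k < N - R - 1
        · rw [List.getElem_append_left (by simp; omega),
              List.getElem_append_left (by simp; omega)]
          simp
        · rw [List.getElem_append_right (α := Int) (by simp; omega),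
              List.getElem_append_right (α := Int) (by simp; omega)]
          simp

-- B's greedy loop produces (after the accumulator) the r ceiling values followed by the n-r floors.
lemma loop_greedy (N : Nat) : ∀ (n s : Int) (acc : List Int), n = (N : Int) → 0 < n → n ≤ s →
    solutionAltLoop n s acc
    = acc ++ List.replicate (PySem.Int.mod s n).toNat (PySem.Int.floordiv s n + 1)
          ++ List.replicate (n - PySem.Int.mod s n).toNat (PySem.Int.floordiv s n) := by
  induction N with
  | zero => intro n s acc hn hpos _; omega
  | succ N ih =>
    intro n s acc hn hpos hns
    set b := PySem.Int.floordiv s n with hb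
    set r := PySem.Int.mod s n with hr
    have hsum : b * n + r = s := PySem.Int.floordiv_mul_add_mod s n
    have hr0 : 0 ≤ r := PySem.Int.mod_nonneg s hpos
    have hrn : r < n := PySem.Int.mod_lt s hpos
    have hb1 : 1 ≤ b := by nlinarith
    rw [solutionAltLoop, dif_pos hpos]
    by_cases hrz : r = 0
    · -- ceiling = b
      have hq : -(PySem.Int.floordiv (-s) n) = b := by
        rw [PySem.Int.neg_floordiv_neg_eq_iff_of_pos hpos]
        constructor <;> nlinarith
      rw [hq]
      by_cases hn1 : n = 1
      · rw [solutionAltLoop, dif_neg (by omega : ¬ (0:Int) < n - 1)]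
        rw [hrz, hn1]
        simp
      · have hpos' : 0 < n - 1 := by omega
        have hfd' : PySem.Int.floordiv (s - b) (n - 1) = b := by
          rw [PySem.Int.floordiv_eq_iff_of_pos hpos']
          constructor <;> nlinarith
        have hmod' : PySem.Int.mod (s - b) (n - 1) = 0 := by
          have h2 := PySem.Int.floordiv_mul_add_mod (s - b) (n - 1)
          rw [hfd'] at h2; nlinarith
        rw [ih (n - 1) (s - b) (acc ++ [b]) (by omega) hpos' (by nlinarith)]
        rw [hfd', hmod', hrz]
        simp only [Int.toNat_zero, List.replicate_zero, List.append_nil, Int.sub_zero,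
          List.append_assoc, List.singleton_append]
        have h3 : n.toNat = (n - 1).toNat + 1 := by omega
        rw [h3, List.replicate_succ]
    · -- ceiling = b + 1
      have hr1 : 1 ≤ r := lt_of_le_of_ne hr0 (Ne.symm hrz)
      have hbn1 : 0 ≤ (b - 1) * (n - 1) := mul_nonneg (by linarith) (by linarith)
      have hq : -(PySem.Int.floordiv (-s) n) = b + 1 := by
        rw [PySem.Int.neg_floordiv_neg_eq_iff_of_pos hpos]
        constructor <;> nlinarith
      rw [hq]
      have hn2 : 2 ≤ n := by omega
      have hpos' : 0 < n - 1 := by omega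
      have hfd' : PySem.Int.floordiv (s - (b + 1)) (n - 1) = b := by
        rw [PySem.Int.floordiv_eq_iff_of_pos hpos']
        constructor <;> nlinarith
      have hmod' : PySem.Int.mod (s - (b + 1)) (n - 1) = r - 1 := by
        have h2 := PySem.Int.floordiv_mul_add_mod (s - (b + 1)) (n - 1)
        rw [hfd'] at h2; nlinarith
      rw [ih (n - 1) (s - (b + 1)) (acc ++ [b + 1]) (by omega) hpos' (by nlinarith)]
      rw [hfd', hmod']
      have h3 : r.toNat = (r - 1).toNat + 1 := by omega
      have h4 : (n - 1 - (r - 1)).toNat = (n - r).toNat := by omega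
      rw [h3, h4, List.replicate_succ]
      simp [List.append_assoc]

-- ===== VERDICT (by name: the statement is the Claim_ definition above) =====
theorem solution_spec : Claim_equal_solution := by
  intro n s _ hpre
  unfold Spec_solution solution solution_alt
  by_cases hgt : n > s
  · simp [hgt]
  · simp only [hgt, if_false]
    have hns : n ≤ s := le_of_not_gt hgt
    have hn0 : n ≠ 0 := by
      rcases hpre with h | h
      · exact absurd h hgt
      · exact h
    rcases lt_or_gt_of_ne hn0 with hneg | hpos
    · -- n < 0: both sides are []
      have hm := PySem.Int.mod_neg_bounds s hneg
      have h1 : PySem.List.pyRange 0 (PySem.Int.mod s n) 1 = [] :=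
        PySem.List.pyRange_one_eq_nil (by omega)
      have h2 : n.toNat = 0 := by omega
      have hB : solutionAltLoop n s [] = [] := by
        rw [solutionAltLoop]; simp [show ¬ 0 < n by omega]
      simp [h1, h2, hB]
    · -- n > 0
      have hr0 : 0 ≤ PySem.Int.mod s n := PySem.Int.mod_nonneg s hpos
      have hrn : PySem.Int.mod s n < n := PySem.Int.mod_lt s hpos
      have hNcast : ((n.toNat : Int)) = n := Int.toNat_of_nonneg (le_of_lt hpos)
      have hRcast : (((PySem.Int.mod s n).toNat : Int)) = PySem.Int.mod s n :=
        Int.toNat_of_nonneg hr0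
      have hle : (PySem.Int.mod s n).toNat ≤ n.toNat := by omega
      have hA := loop_blocks n.toNat (PySem.Int.floordiv s n) (PySem.Int.mod s n).toNat hle
      rw [hRcast, hNcast] at hA
      have h5 : n.toNat - (PySem.Int.mod s n).toNat = (n - PySem.Int.mod s n).toNat := by omega
      rw [h5] at hA
      rw [hA, loop_greedy n.toNat n s [] hNcast.symm hpos hns]
      simp [List.reverse_append]
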